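-- pv_equiv track=rewrite | github.com/swarnabhK/Helsinki_python_solutions | part5/sudoku_check_grid.py | check_grid
-- ===== SOURCE A (Python) =====
-- from collections import defaultdict
--
-- def check_grid(s):
--   dic = defaultdict(int)
--   for i in range(len(s)):
--     for j in range(len(s[0])):
--       if s[i][j]!=0:
--         dic[s[i][j]]+=1
--   for key in dic:
--     if dic[key]>1:
--       return False
--   return True
-- ===== SOURCE B (Python) =====
-- def check_grid(s):
--   w = len(s[0]) if s else 0
--   vals = sorted(v for row in s for v in row[:w] if v != 0)
--   return all(a != b for a, b in zip(vals, vals[1:]))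
-- ===== Notes on version B (the rewrite author's own statement) =====
-- stated objective: alternative
-- what changed: Replaced the count-into-a-defaultdict-then-rescan-the-dict approach with a sort-based one: gather the scanned nonzero values, sort them, and report a duplicate iff two adjacent sorted values are equal; the counter dict and both index loops disappear.
import Mathlib
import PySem

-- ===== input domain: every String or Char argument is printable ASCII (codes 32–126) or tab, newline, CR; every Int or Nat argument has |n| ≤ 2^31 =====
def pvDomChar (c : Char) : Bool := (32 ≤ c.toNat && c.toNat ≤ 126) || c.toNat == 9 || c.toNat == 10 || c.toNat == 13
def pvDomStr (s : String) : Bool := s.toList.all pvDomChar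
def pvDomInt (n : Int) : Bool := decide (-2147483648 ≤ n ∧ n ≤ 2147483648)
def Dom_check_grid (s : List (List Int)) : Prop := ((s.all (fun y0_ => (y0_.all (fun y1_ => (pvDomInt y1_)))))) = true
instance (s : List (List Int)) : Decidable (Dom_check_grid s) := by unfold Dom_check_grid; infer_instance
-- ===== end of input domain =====

-- B replaces A's count-into-a-dict-then-rescan with a sort-based check: sort the scanned nonzero values and look for equal neighbours (alternative algorithm, similar cost).

-- ===== PORT A =====
-- literal transliteration: defaultdict counter over the i,j rectangle, then a scan of the dict's keys
def check_grid (s : List (List Int)) : Bool :=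
  let dic : PySem.Dict Int Int :=
    (PySem.List.pyRange 0 (s.length : Int) 1).foldl (fun d i =>
      (PySem.List.pyRange 0 ((PySem.List.pyGetD s 0 []).length : Int) 1).foldl (fun d j =>
        if PySem.List.pyGetD (PySem.List.pyGetD s i []) j 0 ≠ 0 then
          d.modify (PySem.List.pyGetD (PySem.List.pyGetD s i []) j 0) 0 (· + 1)
        else d) d)
      PySem.Dict.empty
  dic.keys.all (fun k => decide (dic.getD k 0 ≤ 1))

-- ===== PORT B =====
-- literal transliteration of Source B: w = len(s[0]) if s else 0; vals = sorted(nonzero values of row[:w]); adjacent-pair scan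
def check_grid_alt (s : List (List Int)) : Bool :=
  let w : Int := if s ≠ [] then ((s.headD []).length : Int) else 0
  let vals : List Int :=
    PySem.List.sorted (s.flatMap (fun row =>
      (PySem.List.slice row none (some w)).filter (fun v => decide (v ≠ 0)))) (fun v => v) false
  (vals.zip (vals.drop 1)).all (fun p => decide (p.1 ≠ p.2))

-- ===== PRECONDITION & SPEC =====
-- Pre_ excludes exactly the ragged grids on which Python A raises IndexError: some row shorter than row 0.
def Pre_check_grid (s : List (List Int)) : Prop :=
  ∀ row ∈ s, (s.headD []).length ≤ row.length
instance (s : List (List Int)) : Decidable (Pre_check_grid s) := by unfold Pre_check_grid; infer_instance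
def pvWitness_check_grid : List (List Int) := [[1, 2, 0], [3, 0, 4], [5, 6, 7]]

def Spec_check_grid (s : List (List Int)) (out : Bool) : Prop := out = check_grid_alt s
instance (s : List (List Int)) (out : Bool) : Decidable (Spec_check_grid s out) := by unfold Spec_check_grid; infer_instance

-- ===== CLAIM (what is proved, stated in full; the proofs are below) =====
def Claim_equal_check_grid : Prop := ∀ (s : List (List Int)), Dom_check_grid s → Pre_check_grid s → Spec_check_grid s (check_grid s)

-- ===== LEMMAS AND PROOFS =====

-- the flat list of scanned nonzero values, in scan order
def pvVals (s : List (List Int)) : List Int :=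
  ((s.map (fun r => r.take (PySem.List.pyGetD s 0 []).length)).flatten).filter
    (fun v => decide (v ≠ 0))

theorem pv_head (s : List (List Int)) : PySem.List.pyGetD s 0 [] = s.headD [] := by
  rw [PySem.List.pyGetD_of_nonneg _ _ le_rfl]
  cases s <;> rfl

-- a fold over range(w) reading row[j] is a fold over row.take w  (w ≤ len row)
theorem pv_foldl_range_take {β : Type} (f : β → Int → β) (row : List Int) (w : Nat)
    (h : w ≤ row.length) (init : β) :
    (PySem.List.pyRange 0 (w : Int) 1).foldl (fun acc j => f acc (PySem.List.pyGetD row j 0)) init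
      = (row.take w).foldl f init := by
  have hlen : (row.take w).length = w := by
    simp [List.length_take, Nat.min_eq_left h]
  have key : ∀ (acc : β), ∀ j ∈ PySem.List.pyRange 0 (w : Int) 1,
      f acc (PySem.List.pyGetD row j 0) = f acc (PySem.List.pyGetD (row.take w) j 0) := by
    intro acc j hj
    rw [PySem.List.mem_pyRange_one] at hj
    obtain ⟨h0, h1⟩ := hj
    rw [PySem.List.pyGetD_of_nonneg _ _ h0, PySem.List.pyGetD_of_nonneg _ _ h0]
    have hjw : j.toNat < w := by omega
    congr 1
    simp [List.getD_eq_getElem?_getD, hjw]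
  rw [PySem.List.foldl_congr_mem _ _ _ _ key]
  have := PySem.List.foldl_pyRange_zero_pyGetD' (row.take w) 0 f init
  rw [hlen] at this
  exact this

-- the nested i,j fold over the rectangle is a fold over the flattened scanned values
theorem pv_rect_fold {δ : Type} (s : List (List Int)) (hpre : Pre_check_grid s)
    (g : δ → Int → δ) (init : δ) :
    (PySem.List.pyRange 0 (s.length : Int) 1).foldl (fun d i =>
      (PySem.List.pyRange 0 ((PySem.List.pyGetD s 0 []).length : Int) 1).foldl
        (fun d j => g d (PySem.List.pyGetD (PySem.List.pyGetD s i []) j 0)) d) init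
    = ((s.map (fun r => r.take (PySem.List.pyGetD s 0 []).length)).flatten).foldl g init := by
  rw [PySem.List.foldl_pyRange_zero_pyGetD' s []
    (fun d row => (PySem.List.pyRange 0 ((PySem.List.pyGetD s 0 []).length : Int) 1).foldl
      (fun d j => g d (PySem.List.pyGetD row j 0)) d) init]
  rw [PySem.List.foldl_congr_mem s _
    (fun d row => (row.take (PySem.List.pyGetD s 0 []).length).foldl g d) init
    (by
      intro acc row hrow
      exact pv_foldl_range_take g row _ (by rw [pv_head]; exact hpre row hrow) acc)]
  rw [List.foldl_flatten, List.foldl_map]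

theorem pv_A_eq (s : List (List Int)) (hpre : Pre_check_grid s) :
    check_grid s = decide (pvVals s).Nodup := by
  unfold check_grid
  dsimp only
  rw [pv_rect_fold (δ := PySem.Dict Int Int) s hpre (fun d v => if v ≠ 0 then d.modify v 0 (· + 1) else d) PySem.Dict.empty]
  rw [PySem.List.foldl_ite_eq_foldl_filter (fun v => v ≠ 0) (fun (d : PySem.Dict Int Int) v => d.modify v 0 (· + 1))]
  rw [← PySem.Dict.counter_eq_foldl]
  rw [show ((s.map (fun r => r.take (PySem.List.pyGetD s 0 []).length)).flatten).filter
        (fun v => decide (v ≠ 0)) = pvVals s from rfl]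
  rw [PySem.Dict.keys_counter]
  rw [Bool.eq_iff_iff]
  simp only [List.all_eq_true, PySem.Set.mem_ofList, PySem.Dict.getD_counter, decide_eq_true_eq,
    List.nodup_iff_count_le_one]
  constructor
  · intro h a
    by_cases ha : a ∈ pvVals s
    · exact_mod_cast h a ha
    · simp [List.count_eq_zero_of_not_mem ha]
  · intro h k _
    exact_mod_cast h k

-- on a ≤-sorted list, "no two adjacent elements equal" is exactly Nodup
theorem pv_adjacent_nodup : ∀ (v : List Int), v.Pairwise (· ≤ ·) →
    ((v.zip (v.drop 1)).all (fun p => decide (p.1 ≠ p.2)) = decide v.Nodup) := by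
  intro v
  induction v with
  | nil => intro _; rfl
  | cons a t ih =>
    intro hp
    rcases hp with _ | ⟨hle, hpt⟩
    cases t with
    | nil => simp
    | cons b t' =>
      have iht := ih hpt
      simp only [List.drop_succ_cons, List.drop_zero] at iht ⊢
      simp only [List.zip_cons_cons, List.all_cons, iht]
      rw [Bool.eq_iff_iff]
      simp only [Bool.and_eq_true, decide_eq_true_eq, List.nodup_cons]
      constructor
      · rintro ⟨hab, hnd⟩
        refine ⟨?_, hnd⟩
        intro hmem
        rcases hpt with _ | ⟨hble, _⟩
        have hab' : a ≤ b := hle b (List.mem_cons_self ..)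
        rcases List.mem_cons.mp hmem with rfl | hmem'
        · exact hab rfl
        · have : b ≤ a := hble a hmem'
          exact hab (le_antisymm hab' this)
      · rintro ⟨hnm, hnd⟩
        exact ⟨fun hab => hnm (hab ▸ List.mem_cons_self ..), hnd⟩

theorem pv_B_eq (s : List (List Int)) (hpre : Pre_check_grid s) :
    check_grid_alt s = decide (pvVals s).Nodup := by
  unfold check_grid_alt
  dsimp only
  have hw : (if s ≠ [] then ((s.headD []).length : Int) else 0)
      = ((PySem.List.pyGetD s 0 []).length : Int) := by
    rw [pv_head]; cases s <;> simp
  rw [hw]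
  have hflat : (s.flatMap (fun row =>
      (PySem.List.slice row none (some ((PySem.List.pyGetD s 0 []).length : Int))).filter
        (fun v => decide (v ≠ 0)))) = pvVals s := by
    unfold pvVals
    rw [List.flatMap_def, List.filter_flatten, List.map_map]
    congr 1
    apply List.map_congr_left
    intro row _
    simp only [Function.comp]
    rw [PySem.List.slice_to_natCast]
  rw [hflat]
  have hperm : (PySem.List.sorted (pvVals s) (fun v => v) false).Perm (pvVals s) :=
    PySem.List.sorted_perm _ _ _
  have hpair : (PySem.List.sorted (pvVals s) (fun v => v) false).Pairwise (· ≤ ·) := by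
    have := PySem.List.sorted_pairwise (xs := pvVals s) (key := fun v => v)
    simpa using this
  rw [pv_adjacent_nodup _ hpair]
  rw [decide_eq_decide]
  exact hperm.nodup_iff

-- ===== VERDICT (by name: the statement is the Claim_ definition above) =====
theorem check_grid_spec : Claim_equal_check_grid := by
  intro s _ hpre
  unfold Spec_check_grid
  rw [pv_A_eq s hpre, pv_B_eq s hpre]
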